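-- pv_equiv track=rewrite | github.com/TheGovindRachapudi/MIDIGPT | test_scale_adherence.py | get_scale_pitch_classes
-- ===== SOURCE A (Python) =====
-- def get_scale_pitch_classes(key, mode):
--     """Get pitch classes for a given key and mode"""
--     # Map note names to pitch classes
--     note_to_pc = {'C': 0, 'C#': 1, 'Db': 1, 'D': 2, 'D#': 3, 'Eb': 3, 'E': 4,
--                   'F': 5, 'F#': 6, 'Gb': 6, 'G': 7, 'G#': 8, 'Ab': 8, 'A': 9,
--                   'A#': 10, 'Bb': 10, 'B': 11}
--
--     root = note_to_pc.get(key, 0)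
--
--     if mode == 'major':
--         intervals = [0, 2, 4, 5, 7, 9, 11]  # Major scale
--     else:  # minor
--         intervals = [0, 2, 3, 5, 7, 8, 10]  # Natural minor scale
--
--     return [(root + interval) % 12 for interval in intervals]
-- ===== SOURCE B (Python) =====
-- def get_scale_pitch_classes(key, mode):
--     """Get pitch classes for a given key and mode"""
--     note_to_pc = {'C': 0, 'C#': 1, 'Db': 1, 'D': 2, 'D#': 3, 'Eb': 3, 'E': 4,
--                   'F': 5, 'F#': 6, 'Gb': 6, 'G': 7, 'G#': 8, 'Ab': 8, 'A': 9,
--                   'A#': 10, 'Bb': 10, 'B': 11}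
--     # whole/half-step pattern of the mode, instead of absolute intervals
--     steps = [2, 2, 1, 2, 2, 2, 1] if mode == 'major' else [2, 1, 2, 2, 1, 2, 2]
--     current = note_to_pc.get(key, 0)
--     result = []
--     for step in steps:
--         result.append(current % 12)
--         current += step
--     return result
-- ===== Notes on version B (the rewrite author's own statement) =====
-- stated objective: alternative
-- what changed: B derives the scale from the mode's whole/half-step pattern with a running accumulator appended before each step, instead of mapping a fixed list of absolute intervals over the root.
import Mathlib
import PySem

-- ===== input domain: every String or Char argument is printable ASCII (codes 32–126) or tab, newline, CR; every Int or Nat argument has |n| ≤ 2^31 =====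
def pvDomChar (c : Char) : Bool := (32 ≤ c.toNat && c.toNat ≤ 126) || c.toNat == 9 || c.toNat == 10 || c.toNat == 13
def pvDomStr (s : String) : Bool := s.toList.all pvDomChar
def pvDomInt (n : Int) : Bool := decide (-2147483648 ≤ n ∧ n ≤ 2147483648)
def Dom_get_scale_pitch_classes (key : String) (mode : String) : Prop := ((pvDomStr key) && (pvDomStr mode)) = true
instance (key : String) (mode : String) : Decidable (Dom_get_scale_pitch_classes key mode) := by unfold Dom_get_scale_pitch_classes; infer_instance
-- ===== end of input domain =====

-- B builds the scale from the mode's step pattern with a running accumulator instead of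
-- mapping absolute intervals (objective: alternative decomposition; same cost).

-- ===== PORT A =====
def pvNoteToPc : PySem.Dict String Int :=
  PySem.Dict.ofList [("C", 0), ("C#", 1), ("Db", 1), ("D", 2), ("D#", 3), ("Eb", 3), ("E", 4),
   ("F", 5), ("F#", 6), ("Gb", 6), ("G", 7), ("G#", 8), ("Ab", 8), ("A", 9),
   ("A#", 10), ("Bb", 10), ("B", 11)]

def get_scale_pitch_classes (key : String) (mode : String) : List Int :=
  let root : Int := PySem.Dict.getD pvNoteToPc key 0
  let intervals : List Int := if mode == "major" then [0, 2, 4, 5, 7, 9, 11] else [0, 2, 3, 5, 7, 8, 10]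
  intervals.map (fun interval => PySem.Int.mod (root + interval) 12)

-- ===== PORT B =====
-- the loop of Source B: append current % 12, then advance current by the step
def pvStepLoop (current : Int) : List Int → List Int
  | [] => []
  | step :: rest => PySem.Int.mod current 12 :: pvStepLoop (current + step) rest

def get_scale_pitch_classes_alt (key : String) (mode : String) : List Int :=
  let steps : List Int := if mode == "major" then [2, 2, 1, 2, 2, 2, 1] else [2, 1, 2, 2, 1, 2, 2]
  let current : Int := PySem.Dict.getD pvNoteToPc key 0
  pvStepLoop current steps

-- ===== PRECONDITION & SPEC =====
def Spec_get_scale_pitch_classes (key : String) (mode : String) (out : List Int) : Prop := out = get_scale_pitch_classes_alt key mode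
instance (key : String) (mode : String) (out : List Int) : Decidable (Spec_get_scale_pitch_classes key mode out) := by unfold Spec_get_scale_pitch_classes; infer_instance

-- ===== CLAIM (what is proved, stated in full; the proofs are below) =====
def Claim_equal_get_scale_pitch_classes : Prop := ∀ (key : String) (mode : String), Dom_get_scale_pitch_classes key mode → Spec_get_scale_pitch_classes key mode (get_scale_pitch_classes key mode)

-- ===== LEMMAS AND PROOFS =====
theorem pv_lists_eq (r : Int) (mj : Bool) :
    ((if mj then [(0:Int), 2, 4, 5, 7, 9, 11] else [0, 2, 3, 5, 7, 8, 10]).map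
      (fun interval => PySem.Int.mod (r + interval) 12)) =
    pvStepLoop r (if mj then [2, 2, 1, 2, 2, 2, 1] else [2, 1, 2, 2, 1, 2, 2]) := by
  cases mj <;> simp [pvStepLoop, PySem.Int.mod] <;> ring_nf <;> simp

-- ===== VERDICT (by name: the statement is the Claim_ definition above) =====
theorem get_scale_pitch_classes_spec : Claim_equal_get_scale_pitch_classes := by
  intro key mode _
  unfold Spec_get_scale_pitch_classes get_scale_pitch_classes get_scale_pitch_classes_alt
  exact pv_lists_eq (PySem.Dict.getD pvNoteToPc key 0) (mode == "major")
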